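-- pv_equiv track=rewrite | github.com/djdanielsson/apme | src/apme_engine/validators/gitleaks/scanner.py | _build_stdin_payload
-- ===== SOURCE A (Python) =====
-- _NODE_DELIMITER = "# __apme_node__ "
--
-- def _build_stdin_payload(
--     nodes: list[tuple[str, str]],
-- ) -> tuple[str, list[int], list[str], dict[str, str]]:
--     """Concatenate node content with delimiter lines and build a line-to-node map.
--
--     Args:
--         nodes: ``(node_id, content)`` tuples.
--
--     Returns:
--         Tuple of ``(payload_text, delimiter_lines, node_ids,
--         node_content_by_id)`` in the same order as ``nodes``, where
--         ``delimiter_lines[i]`` is the 1-based line number of the delimiter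
--         for ``node_ids[i]``.
--     """
--     parts: list[str] = []
--     delimiter_lines: list[int] = []
--     node_ids: list[str] = []
--     content_by_id: dict[str, str] = {}
--     current_line = 1
--
--     for node_id, content in nodes:
--         delimiter = f"{_NODE_DELIMITER}{node_id}\n"
--         parts.append(delimiter)
--         delimiter_lines.append(current_line)
--         node_ids.append(node_id)
--         content_by_id[node_id] = content
--         current_line += 1
--
--         if content and not content.endswith("\n"):
--             content += "\n"
--         parts.append(content)
--         current_line += content.count("\n")
--
--     return "".join(parts), delimiter_lines, node_ids, content_by_id
-- ===== SOURCE B (Python) =====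
-- _NODE_DELIMITER = "# __apme_node__ "
--
--
-- def _normalize(content):
--     if content and not content.endswith("\n"):
--         return content + "\n"
--     return content
--
--
-- def _merge_build(nodes):
--     """Divide and conquer: returns (payload, delimiter_lines, node_ids, n_lines)."""
--     if not nodes:
--         return "", [], [], 0
--     if len(nodes) == 1:
--         node_id, content = nodes[0]
--         norm = _normalize(content)
--         block = f"{_NODE_DELIMITER}{node_id}\n{norm}"
--         return block, [1], [node_id], 1 + norm.count("\n")
--     mid = len(nodes) // 2
--     p1, l1, i1, n1 = _merge_build(nodes[:mid])
--     p2, l2, i2, n2 = _merge_build(nodes[mid:])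
--     return p1 + p2, l1 + [x + n1 for x in l2], i1 + i2, n1 + n2
--
--
-- def _build_stdin_payload(nodes):
--     payload, delimiter_lines, node_ids, _ = _merge_build(nodes)
--     return payload, delimiter_lines, node_ids, dict(nodes)
-- ===== Notes on version B (the rewrite author's own statement) =====
-- stated objective: alternative
-- what changed: Replaces A's single left-to-right pass threading a running line counter through four accumulators by a divide-and-conquer recursion: each half is built independently and the results merged by concatenating payloads, shifting the right half's delimiter lines by the left half's carried line count, and building the id->content dict once as dict(nodes).
import Mathlib
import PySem

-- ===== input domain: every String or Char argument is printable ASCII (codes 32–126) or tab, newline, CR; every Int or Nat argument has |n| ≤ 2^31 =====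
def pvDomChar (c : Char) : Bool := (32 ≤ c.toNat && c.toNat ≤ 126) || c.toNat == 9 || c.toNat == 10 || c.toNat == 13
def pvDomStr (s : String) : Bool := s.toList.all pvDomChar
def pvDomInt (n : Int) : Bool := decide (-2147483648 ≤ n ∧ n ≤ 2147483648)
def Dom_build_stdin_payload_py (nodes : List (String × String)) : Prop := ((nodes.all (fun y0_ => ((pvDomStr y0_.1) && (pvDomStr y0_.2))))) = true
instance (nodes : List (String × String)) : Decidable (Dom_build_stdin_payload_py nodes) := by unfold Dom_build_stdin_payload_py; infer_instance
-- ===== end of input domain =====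

-- B replaces A's single accumulator-threaded pass by a divide-and-conquer recursion that builds
-- each half independently and merges the results (objective: alternative algorithm, same cost).

-- ===== PORT A =====
def pvDelimStr : String := "# __apme_node__ "

-- loop body of A's 'for node_id, content in nodes'
def pvStepA (st : List String × List Int × List String × PySem.Dict String String × Int)
    (nc : String × String) :
    List String × List Int × List String × PySem.Dict String String × Int :=
  let delim := PySem.Str.join "" [pvDelimStr, nc.1, "\n"]
  let parts := st.1 ++ [delim]
  let dlines := st.2.1 ++ [st.2.2.2.2]
  let nids := st.2.2.1 ++ [nc.1]
  let cbi := st.2.2.2.1.insert nc.1 nc.2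
  let cur := st.2.2.2.2 + 1
  let content := if nc.2 ≠ "" ∧ PySem.Str.endswith nc.2 "\n" = false
                 then PySem.Str.join "" [nc.2, "\n"] else nc.2
  (parts ++ [content], dlines, nids, cbi, cur + (PySem.Str.count content "\n" : Int))

def build_stdin_payload_py (nodes : List (String × String)) :
    String × List Int × List String × (List (String × String)) :=
  let st := nodes.foldl pvStepA ([], [], [], PySem.Dict.empty, 1)
  (PySem.Str.join "" st.1, st.2.1, st.2.2.1, st.2.2.2.1.items)

-- ===== PORT B =====
-- Source B's _normalize
def pvNorm (c : String) : String :=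
  if c ≠ "" ∧ PySem.Str.endswith c "\n" = false then PySem.Str.join "" [c, "\n"] else c

-- Source B's _merge_build: divide and conquer, returns (payload, delimiter_lines, node_ids, n_lines)
def pvMergeBuild : List (String × String) → String × List Int × List String × Int
  | [] => ("", [], [], 0)
  | [nc] =>
      let norm := pvNorm nc.2
      (PySem.Str.join "" [pvDelimStr, nc.1, "\n", norm], [1], [nc.1],
       1 + (PySem.Str.count norm "\n" : Int))
  | a :: b :: rest =>
      let ns := a :: b :: rest
      let mid := ns.length / 2
      let r1 := pvMergeBuild (ns.take mid)
      let r2 := pvMergeBuild (ns.drop mid)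
      (PySem.Str.join "" [r1.1, r2.1],
       r1.2.1 ++ r2.2.1.map (fun x => x + r1.2.2.2),
       r1.2.2.1 ++ r2.2.2.1,
       r1.2.2.2 + r2.2.2.2)
termination_by ns => ns.length
decreasing_by
  · simp [List.length_take]; omega
  · simp; omega

def build_stdin_payload_py_alt (nodes : List (String × String)) :
    String × List Int × List String × (List (String × String)) :=
  let r := pvMergeBuild nodes
  (r.1, r.2.1, r.2.2.1, (PySem.Dict.ofList nodes : PySem.Dict String String).items)

-- ===== PRECONDITION & SPEC =====
def Spec_build_stdin_payload_py (nodes : List (String × String)) (out : String × List Int × List String × (List (String × String))) : Prop := out = build_stdin_payload_py_alt nodes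
instance (nodes : List (String × String)) (out : String × List Int × List String × (List (String × String))) : Decidable (Spec_build_stdin_payload_py nodes out) := by unfold Spec_build_stdin_payload_py; infer_instance

-- ===== CLAIM (what is proved, stated in full; the proofs are below) =====
def Claim_equal_build_stdin_payload_py : Prop := ∀ (nodes : List (String × String)), Dom_build_stdin_payload_py nodes → Spec_build_stdin_payload_py nodes (build_stdin_payload_py nodes)

-- ===== LEMMAS AND PROOFS =====

-- line numbers produced from a start line and a list of per-node widths
def pvLines : Int → List Int → List Int
  | _, [] => []
  | cur, w :: ws => cur :: pvLines (cur + w) ws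

def pvWidth (nc : String × String) : Int := 1 + (PySem.Str.count (pvNorm nc.2) "\n" : Int)

def pvBlock (nc : String × String) : String :=
  PySem.Str.join "" [pvDelimStr, nc.1, "\n", pvNorm nc.2]

-- A's normalisation branch computes pvNorm
theorem pvStepA_content (c : String) :
    (if c ≠ "" ∧ PySem.Str.endswith c "\n" = false
     then PySem.Str.join "" [c, "\n"] else c) = pvNorm c := rfl

theorem foldA (nodes : List (String × String)) (parts : List String) (dlines : List Int)
    (nids : List String) (d : PySem.Dict String String) (cur : Int) :
    nodes.foldl pvStepA (parts, dlines, nids, d, cur) =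
      (parts ++ nodes.flatMap (fun nc => [PySem.Str.join "" [pvDelimStr, nc.1, "\n"], pvNorm nc.2]),
       dlines ++ pvLines cur (nodes.map pvWidth),
       nids ++ nodes.map Prod.fst,
       nodes.foldl (fun d nc => d.insert nc.1 nc.2) d,
       cur + (nodes.map pvWidth).sum) := by
  induction nodes generalizing parts dlines nids d cur with
  | nil => simp [pvLines]
  | cons nc rest ih =>
    simp only [List.foldl_cons, pvStepA, pvStepA_content]
    rw [ih]
    simp [pvLines, pvWidth, add_assoc]

theorem joinNilChars (ls : List (List Char)) : PySem.Chars.join [] ls = ls.flatten := by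
  induction ls with
  | nil => simp [PySem.Chars.join_nil]
  | cons p rest ih =>
    cases rest with
    | nil => simp [PySem.Chars.join_singleton]
    | cons q r => rw [PySem.Chars.join_cons_cons, ih]; simp

theorem joinNil_toList (parts : List String) :
    (PySem.Str.join "" parts).toList = (parts.map String.toList).flatten := by
  rw [PySem.Str.toList_join]
  show PySem.Chars.join [] (parts.map String.toList) = _
  rw [joinNilChars]

theorem joinStr_singleton (s : String) : PySem.Str.join "" [s] = s := by
  apply String.toList_injective
  rw [joinNil_toList]; simp

theorem join_join (xs ys : List String) :
    PySem.Str.join "" [PySem.Str.join "" xs, PySem.Str.join "" ys] =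
      PySem.Str.join "" (xs ++ ys) := by
  apply String.toList_injective
  simp [joinNilChars]

theorem pvLines_append (u v : List Int) (c : Int) :
    pvLines c (u ++ v) = pvLines c u ++ pvLines (c + u.sum) v := by
  induction u generalizing c with
  | nil => simp [pvLines]
  | cons w ws ih => simp [pvLines, ih, add_assoc]

theorem pvLines_shift (v : List Int) (c s : Int) :
    (pvLines c v).map (fun x => x + s) = pvLines (c + s) v := by
  induction v generalizing c with
  | nil => simp [pvLines]
  | cons w ws ih =>
    simp only [pvLines, List.map_cons, ih]
    rw [show c + w + s = c + s + w by ring]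

theorem payload_eq (nodes : List (String × String)) :
    PySem.Str.join ""
        (nodes.flatMap (fun nc => [PySem.Str.join "" [pvDelimStr, nc.1, "\n"], pvNorm nc.2])) =
      PySem.Str.join "" (nodes.map pvBlock) := by
  apply String.toList_injective
  rw [joinNil_toList, joinNil_toList]
  induction nodes with
  | nil => rfl
  | cons nc rest ih =>
    simp only [List.flatMap_cons, List.map_cons, List.map_append, List.flatten_cons,
      List.flatten_append] at *
    rw [ih]
    simp [pvBlock, joinNilChars, List.append_assoc]

-- characterisation of B's divide-and-conquer recursion
theorem pvMergeBuild_eq (nodes : List (String × String)) :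
    pvMergeBuild nodes =
      (PySem.Str.join "" (nodes.map pvBlock),
       pvLines 1 (nodes.map pvWidth),
       nodes.map Prod.fst,
       (nodes.map pvWidth).sum) := by
  induction hn : nodes.length using Nat.strong_induction_on generalizing nodes with
  | _ n ih =>
    match nodes with
    | [] => simp [pvMergeBuild, pvLines]; rfl
    | [nc] =>
      simp [pvMergeBuild, pvLines, pvWidth, pvBlock, joinStr_singleton]
    | a :: b :: rest =>
      rw [pvMergeBuild]
      have hlen : (a :: b :: rest).length = rest.length + 2 := by simp
      have hmid : (a :: b :: rest).length / 2 < n := by omega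
      have hdrop : ((a :: b :: rest).drop ((a :: b :: rest).length / 2)).length < n := by
        simp; omega
      have htake : ((a :: b :: rest).take ((a :: b :: rest).length / 2)).length < n := by
        simp [List.length_take]; omega
      rw [ih _ htake _ rfl, ih _ hdrop _ rfl]
      simp only [join_join, pvLines_shift, ← pvLines_append, ← List.sum_append,
        ← List.map_append, List.take_append_drop]

-- ===== VERDICT (by name: the statement is the Claim_ definition above) =====
theorem build_stdin_payload_py_spec : Claim_equal_build_stdin_payload_py := by
  intro nodes _
  unfold Spec_build_stdin_payload_py build_stdin_payload_py build_stdin_payload_py_alt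
  simp only [foldA, List.nil_append, pvMergeBuild_eq]
  refine Prod.ext ?_ (Prod.ext rfl (Prod.ext rfl ?_))
  · simpa using payload_eq nodes
  · simp [PySem.Dict.ofList, PySem.Dict.update]
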